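-- pv_equiv track=rewrite | github.com/raugsm/miweb-2.0 | desktop-agent/ariadgsm_agent/support_telemetry.py | classify_status
-- ===== SOURCE A (Python) =====
-- from typing import Any
--
-- def classify_status(events: list[dict[str, Any]]) -> str:
--     if any(event.get("category") == "privacy" and event.get("severity") == "critical" for event in events):
--         return "blocked"
--     if any(event.get("severity") in {"error", "critical"} for event in events):
--         return "attention"
--     if any(event.get("severity") == "warning" for event in events):
--         return "attention"
--     return "ok"
-- ===== SOURCE B (Python) =====
-- def classify_status(events):
--     level = 0
--     for event in events:
--         sev = event.get("severity")
--         if event.get("category") == "privacy" and sev == "critical":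
--             lv = 3
--         elif sev in {"error", "critical", "warning"}:
--             lv = 2
--         else:
--             lv = 0
--         level = max(level, lv)
--     if level == 3:
--         return "blocked"
--     if level == 2:
--         return "attention"
--     return "ok"
-- ===== Notes on version B (the rewrite author's own statement) =====
-- stated objective: alternative
-- what changed: Replaced A's three short-circuiting any() scans with a single pass that computes a per-event severity level (3/2/0), keeps a running maximum, and maps the final maximum to the status string.
import Mathlib
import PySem

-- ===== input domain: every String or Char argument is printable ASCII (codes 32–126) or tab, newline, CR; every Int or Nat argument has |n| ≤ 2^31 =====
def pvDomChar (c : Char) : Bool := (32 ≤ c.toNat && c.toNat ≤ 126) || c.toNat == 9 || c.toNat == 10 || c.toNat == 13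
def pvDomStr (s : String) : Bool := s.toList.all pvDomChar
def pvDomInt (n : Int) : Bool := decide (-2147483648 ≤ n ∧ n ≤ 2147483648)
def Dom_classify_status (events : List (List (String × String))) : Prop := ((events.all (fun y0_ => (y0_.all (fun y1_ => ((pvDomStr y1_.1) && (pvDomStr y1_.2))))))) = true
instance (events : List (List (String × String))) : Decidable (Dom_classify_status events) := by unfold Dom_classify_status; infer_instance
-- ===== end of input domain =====

-- B replaces A's three short-circuiting any() scans by one pass keeping a running
-- maximum severity level, then maps the maximum to the status string (alternative
-- decomposition, same O(n) cost).

-- ===== PORT A =====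
-- event.get(k): first-match lookup in the association list (Python dict access)
def pvGet (ev : List (String × String)) (k : String) : Option String :=
  PySem.Dict.get? (PySem.Dict.mk ev) k

def classify_status (events : List (List (String × String))) : String :=
  if events.any (fun ev => pvGet ev "category" == some "privacy" && pvGet ev "severity" == some "critical") then "blocked"
  else if events.any (fun ev => pvGet ev "severity" == some "error" || pvGet ev "severity" == some "critical") then "attention"
  else if events.any (fun ev => pvGet ev "severity" == some "warning") then "attention"
  else "ok"

-- ===== PORT B =====
def pvLevel (ev : List (String × String)) : Nat :=
  let sev := pvGet ev "severity"
  if pvGet ev "category" == some "privacy" && sev == some "critical" then 3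
  else if sev == some "error" || sev == some "critical" || sev == some "warning" then 2
  else 0

def classify_status_alt (events : List (List (String × String))) : String :=
  let level := events.foldl (fun acc ev => max acc (pvLevel ev)) 0
  if level == 3 then "blocked"
  else if level == 2 then "attention"
  else "ok"

-- ===== PRECONDITION & SPEC =====
def Spec_classify_status (events : List (List (String × String))) (out : String) : Prop := out = classify_status_alt events
instance (events : List (List (String × String))) (out : String) : Decidable (Spec_classify_status events out) := by unfold Spec_classify_status; infer_instance

-- ===== CLAIM (what is proved, stated in full; the proofs are below) =====
def Claim_equal_classify_status : Prop := ∀ (events : List (List (String × String))), Dom_classify_status events → Spec_classify_status events (classify_status events)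

-- ===== LEMMAS AND PROOFS =====

def pvIsB (ev : List (String × String)) : Bool :=
  pvGet ev "category" == some "privacy" && pvGet ev "severity" == some "critical"

def pvIsA (ev : List (String × String)) : Bool :=
  pvGet ev "severity" == some "error" || pvGet ev "severity" == some "critical" || pvGet ev "severity" == some "warning"

theorem pvLevel_eq (ev : List (String × String)) :
    pvLevel ev = if pvIsB ev then 3 else if pvIsA ev then 2 else 0 := by
  simp [pvLevel, pvIsB, pvIsA]

theorem foldl_max_shift (l : List (List (String × String))) (n : Nat) :
    l.foldl (fun acc ev => max acc (pvLevel ev)) n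
      = max n (l.foldl (fun acc ev => max acc (pvLevel ev)) 0) := by
  induction l generalizing n with
  | nil => simp
  | cons e t ih =>
    simp only [List.foldl_cons]
    rw [ih (max n (pvLevel e)), ih (max 0 (pvLevel e))]
    omega

theorem pvM_char (l : List (List (String × String))) :
    (l.any pvIsB = true → l.foldl (fun acc ev => max acc (pvLevel ev)) 0 = 3) ∧
    (l.any pvIsB = false → l.any pvIsA = true → l.foldl (fun acc ev => max acc (pvLevel ev)) 0 = 2) ∧
    (l.any pvIsB = false → l.any pvIsA = false → l.foldl (fun acc ev => max acc (pvLevel ev)) 0 = 0) := by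
  induction l with
  | nil => simp
  | cons e t ih =>
    obtain ⟨ih3, ih2, ih0⟩ := ih
    have hM : ∀ v : Nat, t.foldl (fun acc ev => max acc (pvLevel ev)) 0 = v →
        (e :: t).foldl (fun acc ev => max acc (pvLevel ev)) 0 = max (pvLevel e) v := by
      intro v hv
      rw [List.foldl_cons, foldl_max_shift, hv]; omega
    refine ⟨?_, ?_, ?_⟩ <;>
      simp only [List.any_cons, Bool.or_eq_true, Bool.or_eq_false_iff]
    · rintro (h | h)
      · rcases ht : t.any pvIsB with _ | _
        · rcases ha : t.any pvIsA with _ | _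
          · rw [hM 0 (ih0 ht ha), pvLevel_eq, h]; simp
          · rw [hM 2 (ih2 ht ha), pvLevel_eq, h]; simp
        · rw [hM 3 (ih3 ht), pvLevel_eq, h]; simp
      · rw [hM 3 (ih3 h), pvLevel_eq]
        split_ifs <;> simp_all
    · rintro ⟨hb1, hb2⟩ (ha | ha)
      · rcases ht : t.any pvIsA with _ | _
        · rw [hM 0 (ih0 hb2 ht), pvLevel_eq, hb1, ha]; simp
        · rw [hM 2 (ih2 hb2 ht), pvLevel_eq, hb1, ha]; simp
      · rw [hM 2 (ih2 hb2 ha), pvLevel_eq, hb1]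
        split_ifs <;> simp_all
    · rintro ⟨hb1, hb2⟩ ⟨ha1, ha2⟩
      rw [hM 0 (ih0 hb2 ha2), pvLevel_eq, hb1, ha1]; simp

theorem any_sev_split (l : List (List (String × String))) :
    l.any pvIsA = ((l.any (fun ev => pvGet ev "severity" == some "error" || pvGet ev "severity" == some "critical"))
      || (l.any (fun ev => pvGet ev "severity" == some "warning"))) := by
  induction l with
  | nil => rfl
  | cons e t ih =>
    simp only [List.any_cons, pvIsA, ih]
    cases pvGet e "severity" == some "error" <;> cases pvGet e "severity" == some "critical" <;>
      cases pvGet e "severity" == some "warning" <;> simp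

-- ===== VERDICT (by name: the statement is the Claim_ definition above) =====
theorem classify_status_spec : Claim_equal_classify_status := by
  intro events _
  unfold Spec_classify_status classify_status classify_status_alt
  obtain ⟨h3, h2, h0⟩ := pvM_char events
  have eB : (events.any fun ev => pvGet ev "category" == some "privacy" && pvGet ev "severity" == some "critical")
      = events.any pvIsB := rfl
  rw [eB]
  rcases hb : events.any pvIsB with _ | _
  · rcases hae : (events.any fun ev => pvGet ev "severity" == some "error" || pvGet ev "severity" == some "critical") with _ | _
    · rcases haw : (events.any fun ev => pvGet ev "severity" == some "warning") with _ | _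
      · have ha : events.any pvIsA = false := by rw [any_sev_split, hae, haw]; rfl
        rw [h0 hb ha]; simp
      · have ha : events.any pvIsA = true := by rw [any_sev_split, hae, haw]; rfl
        rw [h2 hb ha]; simp
    · have ha : events.any pvIsA = true := by rw [any_sev_split, hae]; rfl
      rw [h2 hb ha]; simp
  · rw [h3 hb]; simp
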